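-- pv_equiv track=rewrite | github.com/DroningOn/ECE411 | Host_PC_Software/CLASSBOY_with_serial.py | answerCount
-- ===== SOURCE A (Python) =====
-- def answerCount(userDict,userList):
--         """ This function gets a count of the the answers from the dictionary of
--         user data, and returns a tuple of counts for each answer. """
--
--         # setting up variables
--         loopCount = 0
--         aCount = 0
--         bCount = 0
--         cCount = 0
--         dCount = 0
--
--         #Counts totals for each answer
--         while loopCount < len(userList):
--
--                         #get an ID
--                 currentUser = userList[loopCount]
--
--                         #get that ID's answer
--                 currentUserAnswer = userDict[currentUser]
--
--                         #increment the count for that answer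
--                 if currentUserAnswer == 'A':
--                     aCount += 1
--                 elif currentUserAnswer == 'B':
--                     bCount += 1
--                 elif currentUserAnswer == 'C':
--                     cCount += 1
--                 elif currentUserAnswer == 'D':
--                     dCount += 1
--
--                 loopCount +=1
--
--         return (aCount,bCount,cCount,dCount)
-- ===== SOURCE B (Python) =====
-- def answerCount(userDict, userList):
--     answers = [userDict[u] for u in userList]
--     return (answers.count('A'), answers.count('B'),
--             answers.count('C'), answers.count('D'))
-- ===== Notes on version B (the rewrite author's own statement) =====
-- stated objective: idiomatic
-- what changed: Replaces the index-driven while loop with four accumulators and an if/elif ladder by building the answers list once and taking four list.count scans.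
import Mathlib
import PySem

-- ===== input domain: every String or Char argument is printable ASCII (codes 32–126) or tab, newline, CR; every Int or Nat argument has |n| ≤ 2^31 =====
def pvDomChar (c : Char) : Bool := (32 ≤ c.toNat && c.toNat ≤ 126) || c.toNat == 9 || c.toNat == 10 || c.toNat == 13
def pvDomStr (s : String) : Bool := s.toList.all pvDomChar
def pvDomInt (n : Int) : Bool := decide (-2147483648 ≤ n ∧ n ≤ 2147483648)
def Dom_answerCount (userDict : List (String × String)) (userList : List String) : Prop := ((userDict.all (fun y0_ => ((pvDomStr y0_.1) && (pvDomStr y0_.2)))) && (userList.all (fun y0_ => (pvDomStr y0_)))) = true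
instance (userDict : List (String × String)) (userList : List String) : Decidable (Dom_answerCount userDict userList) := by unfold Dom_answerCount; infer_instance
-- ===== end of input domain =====

-- B replaces A's indexed while loop, four accumulators and if/elif ladder by one
-- answers list and four list.count scans (objective: idiomatic).

-- ===== PORT A =====
-- The while loop over loopCount is ported as a foldl over range(len(userList)) with
-- the four accumulators as state; a missing user (Python KeyError) is excluded by
-- Pre_, so the total lookups pyGetD/getD with default "" agree with Python there.
def answerCount (userDict : List (String × String)) (userList : List String) : Int × Int × Int × Int :=
  let d := PySem.Dict.ofList userDict
  (PySem.List.pyRange 0 (PySem.List.len userList) 1).foldl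
    (fun (st : Int × Int × Int × Int) loopCount =>
      let currentUserAnswer := d.getD (PySem.List.pyGetD userList loopCount "") ""
      if currentUserAnswer == "A" then (st.1 + 1, st.2.1, st.2.2.1, st.2.2.2)
      else if currentUserAnswer == "B" then (st.1, st.2.1 + 1, st.2.2.1, st.2.2.2)
      else if currentUserAnswer == "C" then (st.1, st.2.1, st.2.2.1 + 1, st.2.2.2)
      else if currentUserAnswer == "D" then (st.1, st.2.1, st.2.2.1, st.2.2.2 + 1)
      else st)
    (0, 0, 0, 0)

-- ===== PORT B =====
def answerCount_alt (userDict : List (String × String)) (userList : List String) : Int × Int × Int × Int :=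
  let d := PySem.Dict.ofList userDict
  let answers := userList.map (fun u => d.getD u "")
  (PySem.List.count answers "A", PySem.List.count answers "B",
   PySem.List.count answers "C", PySem.List.count answers "D")

-- ===== PRECONDITION & SPEC =====
-- Pre_ excludes exactly the inputs where some listed user is not a dict key: there
-- Python A (and B alike) raise KeyError.
def Pre_answerCount (userDict : List (String × String)) (userList : List String) : Prop :=
  ∀ u ∈ userList, (PySem.Dict.ofList userDict).contains u = true
instance (userDict : List (String × String)) (userList : List String) : Decidable (Pre_answerCount userDict userList) := by unfold Pre_answerCount; infer_instance

def pvWitness_answerCount : (List (String × String)) × List String :=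
  ([("u1", "A"), ("u2", "C")], ["u1", "u2", "u1"])

def Spec_answerCount (userDict : List (String × String)) (userList : List String) (out : Int × Int × Int × Int) : Prop := out = answerCount_alt userDict userList
instance (userDict : List (String × String)) (userList : List String) (out : Int × Int × Int × Int) : Decidable (Spec_answerCount userDict userList out) := by unfold Spec_answerCount; infer_instance

-- ===== CLAIM (what is proved, stated in full; the proofs are below) =====
def Claim_equal_answerCount : Prop := ∀ (userDict : List (String × String)) (userList : List String), Dom_answerCount userDict userList → Pre_answerCount userDict userList → Spec_answerCount userDict userList (answerCount userDict userList)

-- ===== LEMMAS AND PROOFS =====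

-- A's counting step, folded over any answer list from any start state, adds the
-- four occurrence counts of "A","B","C","D".
theorem foldl_counts (ys : List String) (a b c d : Int) :
    ys.foldl
      (fun (st : Int × Int × Int × Int) y =>
        if y == "A" then (st.1 + 1, st.2.1, st.2.2.1, st.2.2.2)
        else if y == "B" then (st.1, st.2.1 + 1, st.2.2.1, st.2.2.2)
        else if y == "C" then (st.1, st.2.1, st.2.2.1 + 1, st.2.2.2)
        else if y == "D" then (st.1, st.2.1, st.2.2.1, st.2.2.2 + 1)
        else st)
      (a, b, c, d)
    = (a + ys.count "A", b + ys.count "B", c + ys.count "C", d + ys.count "D") := by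
  induction ys generalizing a b c d with
  | nil => simp
  | cons y ys ih =>
    rw [List.foldl_cons]
    by_cases hA : y = "A"
    · rw [if_pos (by simp [hA]), ih]
      simp [hA] <;> omega
    · rw [if_neg (by simp [hA])]
      by_cases hB : y = "B"
      · rw [if_pos (by simp [hB]), ih]
        simp [hB] <;> omega
      · rw [if_neg (by simp [hB])]
        by_cases hC : y = "C"
        · rw [if_pos (by simp [hC]), ih]
          simp [hC] <;> omega
        · rw [if_neg (by simp [hC])]
          by_cases hD : y = "D"
          · rw [if_pos (by simp [hD]), ih]
            simp [hD] <;> omega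
          · rw [if_neg (by simp [hD]), ih]
            simp [hA, hB, hC, hD]

-- ===== VERDICT (by name: the statement is the Claim_ definition above) =====
theorem answerCount_spec : Claim_equal_answerCount := by
  intro userDict userList _ _
  unfold Spec_answerCount
  simp only [answerCount, answerCount_alt]
  rw [PySem.List.foldl_pyRange_zero_pyGetD userList ""
      (fun (st : Int × Int × Int × Int) u =>
        if (PySem.Dict.ofList userDict).getD u "" == "A" then (st.1 + 1, st.2.1, st.2.2.1, st.2.2.2)
        else if (PySem.Dict.ofList userDict).getD u "" == "B" then (st.1, st.2.1 + 1, st.2.2.1, st.2.2.2)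
        else if (PySem.Dict.ofList userDict).getD u "" == "C" then (st.1, st.2.1, st.2.2.1 + 1, st.2.2.2)
        else if (PySem.Dict.ofList userDict).getD u "" == "D" then (st.1, st.2.1, st.2.2.1, st.2.2.2 + 1)
        else st) (0, 0, 0, 0)]
  rw [← List.foldl_map (f := fun u => (PySem.Dict.ofList userDict).getD u "")
      (g := fun (st : Int × Int × Int × Int) y =>
        if y == "A" then (st.1 + 1, st.2.1, st.2.2.1, st.2.2.2)
        else if y == "B" then (st.1, st.2.1 + 1, st.2.2.1, st.2.2.2)
        else if y == "C" then (st.1, st.2.1, st.2.2.1 + 1, st.2.2.2)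
        else if y == "D" then (st.1, st.2.1, st.2.2.1, st.2.2.2 + 1)
        else st) (l := userList) (init := ((0 : Int), (0 : Int), (0 : Int), (0 : Int)))]
  rw [foldl_counts]
  simp [PySem.List.count]
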